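-- pv_equiv track=rewrite | github.com/abhinav29102005/ats-backend | app/core/scoring_engine.py | skill_matches
-- ===== SOURCE A (Python) =====
-- def skill_matches(resume_skill: str, jd_skill: str) -> bool:
--     """
--     Check if resume skill matches JD skill (flexible matching with aliases)
--     """
--     resume_lower = resume_skill.lower()
--     jd_lower = jd_skill.lower()
--
--     # Exact match
--     if resume_lower == jd_lower:
--         return True
--
--     # Skill aliases for flexible matching
--     skill_aliases = {
--         'node': ['node.js', 'nodejs', 'node js', 'node'],
--         'postgresql': ['postgres', 'postgresql', 'psql'],
--         'rest api': ['restapi', 'rest api', 'restful api', 'rest', 'restful'],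
--         'ci/cd': ['cicd', 'ci/cd', 'ci cd', 'ci-cd'],
--         'microservices': ['microservice', 'microservices', 'micro services', 'micro-services'],
--         'async': ['asynchronous', 'async', 'asynchronous programming', 'asyncio'],
--         'machine learning': ['ml', 'machine learning', 'machine-learning'],
--         'react': ['reactjs', 'react', 'react.js'],
--         'next': ['nextjs', 'next.js', 'next js', 'next'],
--     }
--
--     # Check if JD skill has aliases
--     for base_skill, aliases in skill_aliases.items():
--         if jd_lower == base_skill or jd_lower in aliases:
--             # Check if resume skill matches any alias
--             if any(alias in resume_lower or resume_lower in alias for alias in aliases):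
--                 return True
--
--     # Substring match (fallback)
--     if jd_lower in resume_lower or resume_lower in jd_lower:
--         return True
--
--     return False
-- ===== SOURCE B (Python) =====
-- _SKILL_ALIASES = {
--     'node': ['node.js', 'nodejs', 'node js', 'node'],
--     'postgresql': ['postgres', 'postgresql', 'psql'],
--     'rest api': ['restapi', 'rest api', 'restful api', 'rest', 'restful'],
--     'ci/cd': ['cicd', 'ci/cd', 'ci cd', 'ci-cd'],
--     'microservices': ['microservice', 'microservices', 'micro services', 'micro-services'],
--     'async': ['asynchronous', 'async', 'asynchronous programming', 'asyncio'],
--     'machine learning': ['ml', 'machine learning', 'machine-learning'],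
--     'react': ['reactjs', 'react', 'react.js'],
--     'next': ['nextjs', 'next.js', 'next js', 'next'],
-- }
--
-- # Reverse lookup built once: every base skill and every alias maps to its group's alias list.
-- _REVERSE_MAP = {}
-- for _base, _aliases in _SKILL_ALIASES.items():
--     _REVERSE_MAP[_base] = _aliases
--     for _a in _aliases:
--         _REVERSE_MAP[_a] = _aliases
--
--
-- def skill_matches(resume_skill: str, jd_skill: str) -> bool:
--     resume_lower = resume_skill.lower()
--     jd_lower = jd_skill.lower()
--
--     if resume_lower == jd_lower:
--         return True
--
--     aliases = _REVERSE_MAP.get(jd_lower)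
--     if aliases is not None and any(a in resume_lower or resume_lower in a for a in aliases):
--         return True
--
--     return jd_lower in resume_lower or resume_lower in jd_lower
-- ===== Notes on version B (the rewrite author's own statement) =====
-- stated objective: idiomatic
-- what changed: B builds a reverse-lookup dict once (each base skill and alias maps to its group's alias list), so the per-call group-by-group scan with membership tests is replaced by a single dict lookup; the exact-match check and substring fallback are unchanged.
import Mathlib
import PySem

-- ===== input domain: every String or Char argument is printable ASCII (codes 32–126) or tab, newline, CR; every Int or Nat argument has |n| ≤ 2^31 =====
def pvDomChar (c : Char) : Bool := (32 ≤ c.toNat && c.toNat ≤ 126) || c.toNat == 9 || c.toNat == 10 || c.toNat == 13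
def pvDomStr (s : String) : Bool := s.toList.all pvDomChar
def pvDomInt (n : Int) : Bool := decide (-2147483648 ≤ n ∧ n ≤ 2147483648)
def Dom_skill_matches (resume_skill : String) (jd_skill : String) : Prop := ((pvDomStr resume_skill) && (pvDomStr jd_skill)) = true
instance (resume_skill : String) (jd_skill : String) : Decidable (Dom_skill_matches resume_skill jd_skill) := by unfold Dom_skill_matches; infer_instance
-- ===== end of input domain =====

-- B replaces A's group-by-group scan over the alias table with a reverse-lookup dict
-- built once (every base skill and alias maps to its group's alias list); objective: idiomatic.

-- ===== PORT A =====
-- the skill_aliases table (shared literal data)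
def pvAliasGroups : List (String × List String) :=
  [("node", ["node.js", "nodejs", "node js", "node"]),
   ("postgresql", ["postgres", "postgresql", "psql"]),
   ("rest api", ["restapi", "rest api", "restful api", "rest", "restful"]),
   ("ci/cd", ["cicd", "ci/cd", "ci cd", "ci-cd"]),
   ("microservices", ["microservice", "microservices", "micro services", "micro-services"]),
   ("async", ["asynchronous", "async", "asynchronous programming", "asyncio"]),
   ("machine learning", ["ml", "machine learning", "machine-learning"]),
   ("react", ["reactjs", "react", "react.js"]),
   ("next", ["nextjs", "next.js", "next js", "next"])]

-- any(alias in resume_lower or resume_lower in alias for alias in aliases)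
def pvAnyMatch (rl : String) (aliases : List String) : Bool :=
  aliases.any (fun a => PySem.Str.isIn a rl || PySem.Str.isIn rl a)

-- A's for-loop over skill_aliases.items(), falling through to the substring fallback
def pvLoopA (rl jl : String) : List (String × List String) → Bool
  | [] => PySem.Str.isIn jl rl || PySem.Str.isIn rl jl
  | (base, aliases) :: rest =>
      if (jl == base || aliases.contains jl) && pvAnyMatch rl aliases then true
      else pvLoopA rl jl rest

def skill_matches (resume_skill : String) (jd_skill : String) : Bool :=
  let resume_lower := PySem.Str.lower resume_skill
  let jd_lower := PySem.Str.lower jd_skill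
  if resume_lower == jd_lower then true
  else pvLoopA resume_lower jd_lower pvAliasGroups

-- ===== PORT B =====
-- module-level loop of Source B: reverse_map[base] = aliases; reverse_map[a] = aliases for each alias
def pvBuildRev (G : List (String × List String)) : PySem.Dict String (List String) :=
  G.foldl (fun d p => p.2.foldl (fun d a => d.insert a p.2) (d.insert p.1 p.2)) PySem.Dict.empty

def pvReverseMap : PySem.Dict String (List String) := pvBuildRev pvAliasGroups

def skill_matches_alt (resume_skill : String) (jd_skill : String) : Bool :=
  let resume_lower := PySem.Str.lower resume_skill
  let jd_lower := PySem.Str.lower jd_skill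
  if resume_lower == jd_lower then true
  else
    match PySem.Dict.get? pvReverseMap jd_lower with
    | some aliases =>
        if pvAnyMatch resume_lower aliases then true
        else PySem.Str.isIn jd_lower resume_lower || PySem.Str.isIn resume_lower jd_lower
    | none => PySem.Str.isIn jd_lower resume_lower || PySem.Str.isIn resume_lower jd_lower

-- ===== PRECONDITION & SPEC =====
def Spec_skill_matches (resume_skill : String) (jd_skill : String) (out : Bool) : Prop := out = skill_matches_alt resume_skill jd_skill
instance (resume_skill : String) (jd_skill : String) (out : Bool) : Decidable (Spec_skill_matches resume_skill jd_skill out) := by unfold Spec_skill_matches; infer_instance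

-- ===== CLAIM (what is proved, stated in full; the proofs are below) =====
def Claim_equal_skill_matches : Prop := ∀ (resume_skill : String) (jd_skill : String), Dom_skill_matches resume_skill jd_skill → Spec_skill_matches resume_skill jd_skill (skill_matches resume_skill jd_skill)

-- ===== LEMMAS AND PROOFS =====

-- last group (in scan order) whose base or alias list contains jl; dict overwrite keeps the LAST write
def pvFindRev (jl : String) : List (String × List String) → Option (List String)
  | [] => none
  | (base, aliases) :: rest =>
      match pvFindRev jl rest with
      | some v => some v
      | none => if jl == base || aliases.contains jl then some aliases else none

-- inner foldl of the builder: inserting every element of l with the fixed value V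
lemma pvGetInnerFold (l : List String) (d : PySem.Dict String (List String))
    (V : List String) (jl : String) :
    (l.foldl (fun d a => d.insert a V) d).get? jl =
      if l.contains jl then some V else d.get? jl := by
  induction l generalizing d with
  | nil => simp
  | cons a l ih =>
      simp only [List.foldl_cons, ih, PySem.Dict.get?_insert, List.contains_cons]
      by_cases h1 : l.contains jl = true <;> by_cases h2 : jl = a <;> simp_all [beq_iff_eq]

-- get? after the whole builder loop = last matching group
lemma pvGetBuild (G : List (String × List String)) (d : PySem.Dict String (List String))
    (jl : String) :
    (G.foldl (fun d p => p.2.foldl (fun d a => d.insert a p.2) (d.insert p.1 p.2)) d).get? jl =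
      match pvFindRev jl G with
      | some v => some v
      | none => d.get? jl := by
  induction G generalizing d with
  | nil => simp [pvFindRev]
  | cons g G ih =>
      obtain ⟨b, al⟩ := g
      simp only [List.foldl_cons, ih, pvFindRev, pvGetInnerFold, PySem.Dict.get?_insert]
      cases hf : pvFindRev jl G with
      | some v => simp
      | none =>
          by_cases h2 : jl = b <;> by_cases hm : jl ∈ al <;>
            simp [h2, hm, beq_iff_eq]

-- if jl hits no group of G, the scan finds nothing
lemma pvFindRev_none (jl : String) (G : List (String × List String))
    (h : ∀ g ∈ G, ¬ jl ∈ g.1 :: g.2) : pvFindRev jl G = none := by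
  induction G with
  | nil => rfl
  | cons g G ih =>
      obtain ⟨b, al⟩ := g
      have hg := h (b, al) (List.mem_cons_self ..)
      simp only [List.mem_cons, not_or] at hg
      rw [pvFindRev, ih (fun g hgm => h g (List.mem_cons_of_mem _ hgm))]
      simp [hg.1, hg.2]

-- if jl hits no group of G, A's loop falls through to the fallback
lemma pvLoopA_fallthrough (rl jl : String) (G : List (String × List String))
    (h : ∀ g ∈ G, ¬ jl ∈ g.1 :: g.2) :
    pvLoopA rl jl G = (PySem.Str.isIn jl rl || PySem.Str.isIn rl jl) := by
  induction G with
  | nil => rfl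
  | cons g G ih =>
      obtain ⟨b, al⟩ := g
      have hg := h (b, al) (List.mem_cons_self ..)
      simp only [List.mem_cons, not_or] at hg
      rw [pvLoopA, ih (fun g hgm => h g (List.mem_cons_of_mem _ hgm))]
      simp [hg.1, hg.2]

-- the key-sets of distinct groups are disjoint: A's first-match scan = B's last-write lookup
lemma pvLoopA_eq_lookup (G : List (String × List String))
    (hdisj : G.Pairwise (fun g h => ∀ s ∈ g.1 :: g.2, ¬ s ∈ h.1 :: h.2))
    (rl jl : String) :
    pvLoopA rl jl G =
      (match pvFindRev jl G with
       | some al =>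
           if pvAnyMatch rl al then true
           else PySem.Str.isIn jl rl || PySem.Str.isIn rl jl
       | none => PySem.Str.isIn jl rl || PySem.Str.isIn rl jl) := by
  induction G with
  | nil => rfl
  | cons g G ih =>
      obtain ⟨b, al⟩ := g
      rw [List.pairwise_cons] at hdisj
      by_cases hc : jl ∈ b :: al
      · have hnone : pvFindRev jl G = none :=
          pvFindRev_none jl G (fun h hm => hdisj.1 h hm jl hc)
        have hfall : pvLoopA rl jl G = (PySem.Str.isIn jl rl || PySem.Str.isIn rl jl) :=
          pvLoopA_fallthrough rl jl G (fun h hm => hdisj.1 h hm jl hc)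
        rw [List.mem_cons] at hc
        rw [pvLoopA, hfall]
        simp only [pvFindRev, hnone]
        have hcb : (jl == b || al.contains jl) = true := by
          cases hc with
          | inl h => simp [h]
          | inr h => simp [h]
        rw [hcb]
        simp
      · rw [List.mem_cons, not_or] at hc
        rw [pvLoopA]
        have hcb : (jl == b || al.contains jl) = false := by
          simp [hc.1, hc.2]
        rw [hcb]
        simp only [Bool.false_and, ih hdisj.2, pvFindRev]
        cases pvFindRev jl G <;> simp [hc.1, hc.2]

-- ===== VERDICT (by name: the statement is the Claim_ definition above) =====
theorem skill_matches_spec : Claim_equal_skill_matches := by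
  intro resume_skill jd_skill _
  unfold Spec_skill_matches skill_matches skill_matches_alt
  set rl := PySem.Str.lower resume_skill
  set jl := PySem.Str.lower jd_skill
  by_cases he : rl == jl
  · simp [he]
  · simp only [he, Bool.false_eq_true, if_false]
    have hget : PySem.Dict.get? pvReverseMap jl =
        match pvFindRev jl pvAliasGroups with
        | some v => some v
        | none => none := by
      rw [pvReverseMap, pvBuildRev, pvGetBuild]
      cases pvFindRev jl pvAliasGroups <;> simp
    rw [hget,
      pvLoopA_eq_lookup pvAliasGroups (by decide) rl jl]
    cases pvFindRev jl pvAliasGroups <;> rfl
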